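-- pv_equiv track=rewrite | github.com/Raptacon/Robot-2026 | subsystem/nfc_battery_tracker.py | _parse_battery_fields
-- ===== SOURCE A (Python) =====
-- def _parse_battery_fields(text: str) -> dict:
--     """Extract all key=value fields from bat: section."""
--     fields = {}
--     if 'bat:' in text:
--         section = text.split('bat:', 1)[1]
--         for line in section.split('\n'):
--             line = line.strip()
--             if '=' in line:
--                 k, v = line.split('=', 1)
--                 fields[k.strip()] = v.strip()
--     return fields
-- ===== SOURCE B (Python) =====
-- def _parse_battery_fields(text: str) -> dict:
--     """Extract all key=value fields from bat: section."""
--     pos = text.find('bat:')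
--     if pos < 0:
--         return {}
--     fields = {}
--     key = None   # key seen on the current line (None until its first '=')
--     buf = []     # characters of the current segment
--     for ch in text[pos + 4:] + '\n':   # sentinel newline flushes the last line
--         if ch == '\n':
--             if key is not None:
--                 fields[key] = ''.join(buf).strip()
--             key = None
--             buf = []
--         elif ch == '=' and key is None:
--             key = ''.join(buf).strip()
--             buf = []
--         else:
--             buf.append(ch)
--     return fields
-- ===== Notes on version B (the rewrite author's own statement) =====
-- stated objective: alternative
-- what changed: B replaces A's split-into-lines-then-split-each-line structure by a single character-by-character state machine over the section (with a sentinel newline appended): it keeps a current-key option and a character buffer and emits a dict entry whenever a line ends, so no split/partition calls remain in the loop.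
import Mathlib
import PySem

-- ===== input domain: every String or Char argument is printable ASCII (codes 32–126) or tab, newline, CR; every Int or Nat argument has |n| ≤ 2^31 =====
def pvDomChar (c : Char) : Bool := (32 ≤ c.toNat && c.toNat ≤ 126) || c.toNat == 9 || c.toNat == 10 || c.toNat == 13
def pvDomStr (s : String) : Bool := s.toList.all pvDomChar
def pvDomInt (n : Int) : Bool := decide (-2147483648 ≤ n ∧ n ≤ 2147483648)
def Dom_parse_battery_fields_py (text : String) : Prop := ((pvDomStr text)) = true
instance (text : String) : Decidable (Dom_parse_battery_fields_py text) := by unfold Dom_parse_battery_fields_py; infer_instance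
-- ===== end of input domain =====

-- B replaces A's split-into-lines / split-each-line-on-'=' structure by a single
-- character-by-character state machine (current-key option + character buffer, flushed
-- at each newline, with a sentinel newline appended); same return value everywhere.

-- ===== PORT A =====
def parse_battery_fields_py (text : String) : List (String × String) :=
  if PySem.Str.isIn "bat:" text then
    let sec := ((PySem.Str.splitMax? text "bat:" 1).getD []).getD 1 ""
    (((PySem.Str.split? sec "\n").getD []).foldl
      (fun (fields : PySem.Dict String String) rawline =>
        let line := PySem.Str.strip rawline
        if PySem.Str.isIn "=" line then
          let parts := (PySem.Str.splitMax? line "=" 1).getD []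
          fields.insert (PySem.Str.strip (parts.getD 0 ""))
                        (PySem.Str.strip (parts.getD 1 ""))
        else fields)
      PySem.Dict.empty).items
  else []

-- ===== PORT B =====
-- one step of the state machine: state = (fields, key-on-current-line?, char buffer)
def bstep (st : PySem.Dict String String × Option String × List Char) (ch : Char) :
    PySem.Dict String String × Option String × List Char :=
  match st with
  | (fields, key, buf) =>
    if ch = '\n' then
      match key with
      | some k => (fields.insert k (PySem.Str.strip (String.ofList buf)), none, [])
      | none => (fields, none, ([] : List Char))
    else if ch = '=' ∧ key = none then
      (fields, some (PySem.Str.strip (String.ofList buf)), [])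
    else (fields, key, buf ++ [ch])

def parse_battery_fields_py_alt (text : String) : List (String × String) :=
  let pos := PySem.Str.find text "bat:"
  if pos < 0 then []
  else
    ((((PySem.Str.slice text (some (pos + 4)) none).toList ++ ['\n']).foldl bstep
      (PySem.Dict.empty, none, [])).1).items

-- ===== PRECONDITION & SPEC =====
def Spec_parse_battery_fields_py (text : String) (out : List (String × String)) : Prop := out = parse_battery_fields_py_alt text
instance (text : String) (out : List (String × String)) : Decidable (Spec_parse_battery_fields_py text out) := by unfold Spec_parse_battery_fields_py; infer_instance

-- ===== CLAIM (what is proved, stated in full; the proofs are below) =====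
def Claim_equal_parse_battery_fields_py : Prop := ∀ (text : String), Dom_parse_battery_fields_py text → Spec_parse_battery_fields_py text (parse_battery_fields_py text)

-- ===== LEMMAS AND PROOFS =====

-- the segment of a line before its first '='
def pvTakeEq (a : List Char) : List Char := a.takeWhile (fun x => x != '=')

-- what A does to the dict for one raw line (characterised on the char level)
def AstepC (d : PySem.Dict String String) (a : List Char) : PySem.Dict String String :=
  if '=' ∈ a then
    d.insert (String.ofList (PySem.Chars.strip (pvTakeEq a)))
             (String.ofList (PySem.Chars.strip (a.drop ((pvTakeEq a).length + 1))))
  else d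

-- the lines of a char list (split on '\n')
def linesOf : List Char → List (List Char)
  | [] => [[]]
  | c :: t => if c = '\n' then [] :: linesOf t else List.modifyHead (fun x => c :: x) (linesOf t)

theorem prefix_sing_iff (c : Char) (d : List Char) : [c] <+: d ↔ d.head? = some c := by
  constructor
  · rintro ⟨t, rfl⟩; simp
  · intro h
    cases d with
    | nil => simp at h
    | cons x t => simp at h; exact ⟨t, by simp [h]⟩

theorem sing_infix_iff (c : Char) (l : List Char) : [c] <:+: l ↔ c ∈ l := by
  constructor
  · intro h; exact h.sublist.subset (by simp)
  · intro h
    obtain ⟨s, t, rfl⟩ := List.append_of_mem h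
    exact ⟨s, t, by simp⟩

-- first occurrence decomposition: l = (chars before first c) ++ c :: rest
theorem first_decomp (c : Char) (l : List Char) (h : c ∈ l) :
    l = l.takeWhile (fun x => x != c) ++ c :: (l.dropWhile (fun x => x != c)).tail ∧
    (∀ x ∈ l.takeWhile (fun x => x != c), x ≠ c) := by
  induction l with
  | nil => simp at h
  | cons x t ih =>
    by_cases hx : x = c
    · subst hx
      refine ⟨?_, ?_⟩
      · simp
      · simp
    · have hct : c ∈ t := by
        rcases List.mem_cons.mp h with h' | h'
        · exact absurd h'.symm hx
        · exact h'
      obtain ⟨h1, h2⟩ := ih hct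
      have hpx : (fun x => x != c) x = true := by simp [hx]
      refine ⟨?_, ?_⟩
      · simp only [List.takeWhile_cons, List.dropWhile_cons, hpx, if_true]
        rw [List.cons_append]
        exact congrArg (x :: ·) h1
      · intro y hy
        simp only [List.takeWhile_cons, hpx, if_true] at hy
        rcases List.mem_cons.mp hy with rfl | hy'
        · exact hx
        · exact h2 y hy'

theorem min_of_takeWhile (c : Char) (u rest : List Char)
    (hu : ∀ x ∈ u, x ≠ c) :
    ∀ i < u.length, ¬ [c] <+: (u ++ rest).drop i := by
  intro i hi hpre
  rw [prefix_sing_iff, List.head?_drop, List.getElem?_append_left hi] at hpre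
  have : u[i]'hi = c := by
    have := List.getElem?_eq_getElem hi
    rw [this] at hpre
    simpa using hpre
  exact hu _ (List.getElem_mem hi) this

theorem go_zero (sep : List Char) (fuel : Nat) (l cur : List Char) (acc : List (List Char)) :
    PySem.Chars.splitOnMax.go sep fuel 0 l cur acc = ((cur.reverse ++ l) :: acc).reverse := by
  cases fuel with
  | zero => simp [PySem.Chars.splitOnMax.go]
  | succ n => cases l <;> simp [PySem.Chars.splitOnMax.go]

theorem go_sep (sep : List Char) (hsep : sep ≠ []) :
    ∀ (a : List Char) (fuel : Nat) (b cur : List Char) (acc : List (List Char)),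
      (a ++ (sep ++ b)).length < fuel →
      (∀ i < a.length, ¬ sep <+: (a ++ (sep ++ b)).drop i) →
      PySem.Chars.splitOnMax.go sep fuel 1 (a ++ (sep ++ b)) cur acc =
        (b :: (cur.reverse ++ a) :: acc).reverse := by
  intro a
  induction a with
  | nil =>
    intro fuel b cur acc hfuel _
    obtain ⟨m, rfl⟩ : ∃ m, fuel = m + 1 := by
      cases fuel with
      | zero => exact (Nat.not_lt_zero _ hfuel).elim
      | succ m => exact ⟨m, rfl⟩
    obtain ⟨s0, st, rfl⟩ : ∃ s0 st, sep = s0 :: st := by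
      cases sep with
      | nil => exact absurd rfl hsep
      | cons s0 st => exact ⟨s0, st, rfl⟩
    have hp : (s0 :: st).isPrefixOf (s0 :: (st ++ b)) = true := by
      rw [List.isPrefixOf_iff_prefix]
      exact ⟨b, by simp⟩
    simp only [List.nil_append, List.cons_append, PySem.Chars.splitOnMax.go]
    rw [if_neg Nat.one_ne_zero, if_pos hp]
    rw [show (s0 :: st).length = st.length + 1 from rfl,
        List.drop_succ_cons, List.drop_left]
    rw [show (1 : Nat) - 1 = 0 from rfl, go_zero]
    simp
  | cons x a' ih =>
    intro fuel b cur acc hfuel hmin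
    obtain ⟨m, rfl⟩ : ∃ m, fuel = m + 1 := by
      cases fuel with
      | zero => exact (Nat.not_lt_zero _ hfuel).elim
      | succ m => exact ⟨m, rfl⟩
    have hnp : ¬ (sep.isPrefixOf (x :: (a' ++ (sep ++ b))) = true) := by
      rw [List.isPrefixOf_iff_prefix]
      have := hmin 0 (by simp)
      simpa using this
    simp only [List.cons_append, PySem.Chars.splitOnMax.go]
    rw [if_neg Nat.one_ne_zero, if_neg hnp]
    rw [ih m b (x :: cur) acc (by simp at hfuel ⊢; omega)
      (by intro i hilt; have := hmin (i + 1) (by simp; omega); simpa using this)]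
    simp

theorem splitOnMax_sep (sep : List Char) (hsep : sep ≠ []) (a b : List Char)
    (hmin : ∀ i < a.length, ¬ sep <+: (a ++ (sep ++ b)).drop i) :
    PySem.Chars.splitOnMax (a ++ (sep ++ b)) sep 1 = [a, b] := by
  rw [PySem.Chars.splitOnMax, if_neg (by omega)]
  rw [show ((1 : Int)).toNat = 1 from rfl]
  rw [go_sep sep hsep a ((a ++ (sep ++ b)).length + 1) b [] [] (by omega) hmin]
  simp

-- strip helpers
theorem mem_dropWhile_iff (p : Char → Bool) (c : Char) (hc : p c = false) (l : List Char) :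
    c ∈ l.dropWhile p ↔ c ∈ l := by
  induction l with
  | nil => simp
  | cons a t ih =>
    by_cases ha : p a
    · simp only [List.dropWhile_cons, ha, if_true, ih, List.mem_cons]
      constructor
      · exact Or.inr
      · rintro (rfl | h)
        · rw [hc] at ha; exact absurd ha (by simp)
        · exact h
    · simp [ha]

theorem mem_strip_iff (c : Char) (hc : PySem.Chars.isspace c = false) (l : List Char) :
    c ∈ PySem.Chars.strip l ↔ c ∈ l := by
  simp only [PySem.Chars.strip, PySem.Chars.rstrip, PySem.Chars.lstrip]
  rw [List.mem_reverse, mem_dropWhile_iff _ _ hc, List.mem_reverse, mem_dropWhile_iff _ _ hc]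

theorem lstrip_append_all (w x : List Char) (hw : ∀ y ∈ w, PySem.Chars.isspace y = true) :
    PySem.Chars.lstrip (w ++ x) = PySem.Chars.lstrip x := by
  simp only [PySem.Chars.lstrip, List.dropWhile_append,
    List.dropWhile_eq_nil_iff.mpr hw, List.isEmpty_nil, if_true]

theorem strip_append_left (w x : List Char) (hw : ∀ y ∈ w, PySem.Chars.isspace y = true) :
    PySem.Chars.strip (w ++ x) = PySem.Chars.strip x := by
  simp only [PySem.Chars.strip, lstrip_append_all w x hw]

theorem strip_all_space (l : List Char) (hl : ∀ y ∈ l, PySem.Chars.isspace y = true) :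
    PySem.Chars.strip l = [] := by
  simp [PySem.Chars.strip, PySem.Chars.lstrip, PySem.Chars.rstrip,
    List.dropWhile_eq_nil_iff.mpr hl]

theorem rstrip_append_all (x w : List Char) (hw : ∀ y ∈ w, PySem.Chars.isspace y = true) :
    PySem.Chars.rstrip (x ++ w) = PySem.Chars.rstrip x := by
  have hnil : List.dropWhile PySem.Chars.isspace w.reverse = [] :=
    List.dropWhile_eq_nil_iff.mpr (by simpa using hw)
  simp [PySem.Chars.rstrip, List.reverse_append, List.dropWhile_append, hnil]

theorem strip_append_right (x w : List Char) (hw : ∀ y ∈ w, PySem.Chars.isspace y = true) :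
    PySem.Chars.strip (x ++ w) = PySem.Chars.strip x := by
  by_cases hx : (PySem.Chars.lstrip x).isEmpty
  · have hx' : ∀ y ∈ x, PySem.Chars.isspace y = true := by
      intro y hy
      by_contra hny
      have : y ∈ PySem.Chars.lstrip x := by
        rw [PySem.Chars.lstrip, mem_dropWhile_iff _ _ (by simpa using hny)]; exact hy
      rw [List.isEmpty_iff] at hx
      simp [hx] at this
    rw [strip_all_space x hx', strip_all_space (x ++ w)
      (by intro y hy; rcases List.mem_append.mp hy with h | h; exact hx' y h; exact hw y h)]
  · simp only [PySem.Chars.lstrip] at hx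
    simp only [PySem.Chars.strip, PySem.Chars.lstrip, List.dropWhile_append, hx]
    exact rstrip_append_all _ _ hw

theorem isspace_eq_false : PySem.Chars.isspace '=' = false := by decide

-- stripping first and then cutting at the first '=' gives the same (re-stripped) key and value
-- as cutting the raw line at its first '='
theorem line_decomp (l : List Char) (h : '=' ∈ l) :
    PySem.Chars.strip (pvTakeEq (PySem.Chars.strip l)) = PySem.Chars.strip (pvTakeEq l) ∧
    PySem.Chars.strip ((PySem.Chars.strip l).drop ((pvTakeEq (PySem.Chars.strip l)).length + 1))
      = PySem.Chars.strip (l.drop ((pvTakeEq l).length + 1)) := by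
  have hqe : (fun x => x != '=') '=' = false := by simp
  set p := PySem.Chars.isspace with hp
  set m := PySem.Chars.lstrip l with hm
  set core := PySem.Chars.rstrip m with hcore
  set w := l.takeWhile p with hwdef
  set w2 := (m.reverse.takeWhile p).reverse with hw2def
  have hl : l = w ++ m := by
    rw [hwdef, hm, PySem.Chars.lstrip, List.takeWhile_append_dropWhile]
  have hmsplit : m = core ++ w2 := by
    rw [hcore, hw2def, PySem.Chars.rstrip, ← hp,
        ← List.reverse_append, List.takeWhile_append_dropWhile, List.reverse_reverse]
  have hw : ∀ y ∈ w, p y = true := fun y hy => List.mem_takeWhile_imp hy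
  have hw2 : ∀ y ∈ w2, p y = true := by
    intro y hy
    rw [hw2def, List.mem_reverse] at hy
    exact List.mem_takeWhile_imp hy
  have hstrip : PySem.Chars.strip l = core := by rw [PySem.Chars.strip, ← hm, ← hcore]
  have hwq : ∀ y ∈ w, (fun x => x != '=') y = true := by
    intro y hy
    have := hw y hy
    have hne : y ≠ '=' := by
      intro hcc; rw [hcc, hp, isspace_eq_false] at this; simp at this
    simp [hne]
  have hmemc : '=' ∈ core := by rw [← hstrip, mem_strip_iff _ isspace_eq_false]; exact h
  have hcne : ¬ ((core.takeWhile (fun x => x != '=')).length = core.length) := by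
    intro hlen
    have heq : core.takeWhile (fun x => x != '=') = core :=
      (List.takeWhile_prefix _).eq_of_length hlen
    have := List.takeWhile_eq_self_iff.mp heq '=' hmemc
    simp at this
  have htWl : l.takeWhile (fun x => x != '=') = w ++ core.takeWhile (fun x => x != '=') := by
    conv_lhs => rw [hl]
    rw [List.takeWhile_append, if_pos (by rw [List.takeWhile_eq_self_iff.mpr hwq])]
    congr 1
    conv_lhs => rw [hmsplit]
    rw [List.takeWhile_append, if_neg hcne]
  have hjlt : (core.takeWhile (fun x => x != '=')).length < core.length :=
    Nat.lt_of_le_of_ne (List.takeWhile_prefix _).length_le hcne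
  constructor
  · rw [pvTakeEq, pvTakeEq, hstrip, htWl, strip_append_left _ _ hw]
  · rw [pvTakeEq, pvTakeEq, hstrip, htWl]
    rw [List.length_append]
    conv_rhs => rw [hl]
    rw [Nat.add_assoc, List.drop_length_add_append]
    conv_rhs => rw [hmsplit]
    rw [List.drop_append_of_le_length (by omega)]
    rw [strip_append_right _ _ hw2]

-- A's loop body on one line equals AstepC
theorem stepA_line (d : PySem.Dict String String) (a : List Char) :
    (let line := PySem.Str.strip (String.ofList a)
     if PySem.Str.isIn "=" line then
       let parts := (PySem.Str.splitMax? line "=" 1).getD []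
       d.insert (PySem.Str.strip (parts.getD 0 "")) (PySem.Str.strip (parts.getD 1 ""))
     else d) = AstepC d a := by
  have heqs : ("=" : String).toList = ['='] := by decide
  show (if PySem.Str.isIn "=" (PySem.Str.strip (String.ofList a)) then
          d.insert
            (PySem.Str.strip (((PySem.Str.splitMax? (PySem.Str.strip (String.ofList a)) "=" 1).getD []).getD 0 ""))
            (PySem.Str.strip (((PySem.Str.splitMax? (PySem.Str.strip (String.ofList a)) "=" 1).getD []).getD 1 ""))
        else d) = AstepC d a
  have hline : PySem.Str.strip (String.ofList a) = String.ofList (PySem.Chars.strip a) := by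
    simp [PySem.Str.strip]
  rw [hline]
  by_cases he : '=' ∈ a
  · have hm : '=' ∈ PySem.Chars.strip a := (mem_strip_iff _ isspace_eq_false a).mpr he
    obtain ⟨hdec, hfree⟩ := first_decomp '=' (PySem.Chars.strip a) hm
    set m := PySem.Chars.strip a with hmdef
    set u := m.takeWhile (fun x => x != '=') with hu
    set v := (m.dropWhile (fun x => x != '=')).tail with hv
    have hIn : PySem.Str.isIn "=" (String.ofList m) = true := by
      rw [PySem.Str.isIn_iff_infix, heqs, String.toList_ofList, sing_infix_iff]
      exact hm
    have hdec' : m = u ++ (['='] ++ v) := hdec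
    have hsom : PySem.Chars.splitOnMax m ['='] 1 = [u, v] := by
      conv_lhs => rw [hdec']
      exact splitOnMax_sep ['='] (by simp) u v
        (min_of_takeWhile '=' u (['='] ++ v) hfree)
    have hsplit : (PySem.Str.splitMax? (String.ofList m) "=" 1).getD []
        = [String.ofList u, String.ofList v] := by
      rw [PySem.Str.splitMax?, String.toList_ofList, heqs,
          PySem.Chars.splitMax?, if_neg (by simp), hsom]
      rfl
    have hvdrop : m.drop (u.length + 1) = v := by
      conv_lhs => rw [hdec]
      rw [List.drop_length_add_append, List.drop_succ_cons, List.drop_zero]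
    have h1 := (line_decomp a he).1
    have h2 := (line_decomp a he).2
    rw [if_pos hIn, hsplit, AstepC, if_pos he]
    have hkey : PySem.Str.strip (String.ofList u)
        = String.ofList (PySem.Chars.strip (pvTakeEq a)) := by
      rw [PySem.Str.strip, String.toList_ofList]
      exact congrArg String.ofList h1
    have hval : PySem.Str.strip (String.ofList v)
        = String.ofList (PySem.Chars.strip (a.drop ((pvTakeEq a).length + 1))) := by
      rw [PySem.Str.strip, String.toList_ofList, ← hvdrop]
      exact congrArg String.ofList h2
    simp only [List.getD, List.getElem?_cons_zero, List.getElem?_cons_succ, Option.getD_some]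
    rw [hkey, hval]
  · have hIn : PySem.Str.isIn "=" (String.ofList (PySem.Chars.strip a)) = false := by
      rw [Bool.eq_false_iff]
      intro hc
      rw [PySem.Str.isIn_iff_infix, heqs, String.toList_ofList, sing_infix_iff,
          mem_strip_iff _ isspace_eq_false] at hc
      exact he hc
    rw [if_neg (by rw [hIn]; simp), AstepC, if_neg he]

-- linesOf is splitOn '\n'
theorem linesOf_no_nl (a : List Char) (h : '\n' ∉ a) : linesOf a = [a] := by
  induction a with
  | nil => rfl
  | cons c t ih =>
    have hc : c ≠ '\n' := fun hcc => h (by simp [hcc])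
    rw [linesOf, if_neg hc, ih (fun ht => h (by simp [ht])), List.modifyHead_cons]

theorem linesOf_append (a b : List Char) (h : '\n' ∉ a) :
    linesOf (a ++ '\n' :: b) = a :: linesOf b := by
  induction a with
  | nil => simp [linesOf]
  | cons x a' ih =>
    have hx : x ≠ '\n' := fun hxx => h (by simp [hxx])
    rw [List.cons_append, linesOf, if_neg hx, ih (fun ht => h (by simp [ht])),
        List.modifyHead_cons]

theorem go_lines : ∀ (fuel : Nat) (l cur : List Char) (acc : List (List Char)),
    l.length < fuel →
    PySem.Chars.splitOn.go ['\n'] fuel l cur acc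
      = acc.reverse ++ List.modifyHead (fun x => cur.reverse ++ x) (linesOf l) := by
  intro fuel
  induction fuel with
  | zero => intro l cur acc h; exact (Nat.not_lt_zero _ h).elim
  | succ n ih =>
    intro l cur acc h
    cases l with
    | nil =>
      simp [PySem.Chars.splitOn.go, linesOf, List.modifyHead]
    | cons c rest =>
      by_cases hc : c = '\n'
      · subst hc
        have hp : (['\n'] : List Char).isPrefixOf ('\n' :: rest) = true := by
          rw [List.isPrefixOf_iff_prefix]; exact ⟨rest, rfl⟩
        simp only [PySem.Chars.splitOn.go]
        rw [if_pos hp]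
        rw [show (['\n'] : List Char).length = 1 from rfl, List.drop_succ_cons, List.drop_zero]
        rw [ih rest [] (cur.reverse :: acc) (by simpa using Nat.lt_of_succ_lt_succ h)]
        rw [linesOf, if_pos rfl]
        cases hl : linesOf rest <;> simp [List.modifyHead]
      · have hp : ¬ ((['\n'] : List Char).isPrefixOf (c :: rest) = true) := by
          rw [List.isPrefixOf_iff_prefix]
          intro ⟨t, ht⟩
          simp at ht
          exact hc ht.1.symm
        simp only [PySem.Chars.splitOn.go]
        rw [if_neg hp]
        rw [ih rest (c :: cur) acc (by simpa using Nat.lt_of_succ_lt_succ h)]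
        rw [linesOf, if_neg hc]
        cases hl : linesOf rest <;> simp [List.modifyHead]

theorem splitOn_eq_linesOf (l : List Char) : PySem.Chars.splitOn l ['\n'] = linesOf l := by
  rw [PySem.Chars.splitOn, go_lines (l.length + 1) l [] [] (by omega)]
  cases hl : linesOf l <;> simp [List.modifyHead]

-- machine lemmas
theorem mach_none (l : List Char) (hn : '\n' ∉ l) (he : '=' ∉ l) :
    ∀ (d : PySem.Dict String String) (buf : List Char),
      List.foldl bstep (d, none, buf) l = (d, none, buf ++ l) := by
  induction l with
  | nil => simp
  | cons c t ih =>
    intro d buf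
    have hc1 : c ≠ '\n' := fun h => hn (by simp [h])
    have hc2 : c ≠ '=' := fun h => he (by simp [h])
    rw [List.foldl_cons, show bstep (d, none, buf) c = (d, none, buf ++ [c]) by
      simp [bstep, hc1, hc2]]
    rw [ih (fun h => hn (by simp [h])) (fun h => he (by simp [h])) d (buf ++ [c])]
    simp

theorem mach_some (l : List Char) (hn : '\n' ∉ l) :
    ∀ (d : PySem.Dict String String) (k : String) (buf : List Char),
      List.foldl bstep (d, some k, buf) l = (d, some k, buf ++ l) := by
  induction l with
  | nil => simp
  | cons c t ih =>
    intro d k buf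
    have hc1 : c ≠ '\n' := fun h => hn (by simp [h])
    rw [List.foldl_cons, show bstep (d, some k, buf) c = (d, some k, buf ++ [c]) by
      simp [bstep, hc1]]
    rw [ih (fun h => hn (by simp [h])) d k (buf ++ [c])]
    simp

theorem line_flush (a : List Char) (hn : '\n' ∉ a) (d : PySem.Dict String String) :
    List.foldl bstep (d, none, []) (a ++ ['\n']) = (AstepC d a, none, []) := by
  by_cases he : '=' ∈ a
  · obtain ⟨hdec, hfree⟩ := first_decomp '=' a he
    set u := a.takeWhile (fun x => x != '=') with hu
    set v := (a.dropWhile (fun x => x != '=')).tail with hv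
    have hnu : '\n' ∉ u := fun h => hn (hdec ▸ (by simp [h] : '\n' ∈ u ++ '=' :: v))
    have heu : '=' ∉ u := fun h => (hfree '=' h) rfl
    have hnv : '\n' ∉ v := fun h => hn (hdec ▸ (by simp [h] : '\n' ∈ u ++ '=' :: v))
    have hdrop : a.drop (u.length + 1) = v := by
      conv_lhs => rw [hdec]
      rw [List.drop_length_add_append, List.drop_succ_cons, List.drop_zero]
    conv_lhs => rw [hdec]
    rw [show (u ++ '=' :: v) ++ ['\n'] = u ++ ('=' :: (v ++ ['\n'])) by simp,
        List.foldl_append, mach_none u hnu heu d [], List.foldl_cons]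
    rw [show bstep (d, none, ([] : List Char) ++ u) '=' =
          (d, some (PySem.Str.strip (String.ofList u)), []) by simp [bstep]]
    rw [List.foldl_append, mach_some v hnv d _ []]
    rw [show List.foldl bstep (d, some (PySem.Str.strip (String.ofList u)),
          ([] : List Char) ++ v) ['\n'] =
        (d.insert (PySem.Str.strip (String.ofList u)) (PySem.Str.strip (String.ofList v)),
          none, []) by simp [bstep]]
    rw [AstepC, if_pos he]
    rw [show PySem.Str.strip (String.ofList u) = String.ofList (PySem.Chars.strip u) by
      simp [PySem.Str.strip]]
    rw [show PySem.Str.strip (String.ofList v) = String.ofList (PySem.Chars.strip v) by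
      simp [PySem.Str.strip]]
    rw [pvTakeEq, ← hu, hdrop]
  · rw [List.foldl_append, mach_none a hn he d []]
    rw [show List.foldl bstep (d, none, ([] : List Char) ++ a) ['\n'] = (d, none, []) by
      simp [bstep]]
    rw [AstepC, if_neg he]

theorem mach_all (n : Nat) : ∀ (s : List Char), s.length ≤ n → ∀ (d : PySem.Dict String String),
    List.foldl bstep (d, none, []) (s ++ ['\n']) = (List.foldl AstepC d (linesOf s), none, []) := by
  induction n with
  | zero =>
    intro s hs d
    have : s = [] := List.eq_nil_of_length_eq_zero (Nat.le_zero.mp hs)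
    subst this
    rw [linesOf, List.foldl_cons, List.foldl_nil, AstepC, if_neg (by simp)]
    simp [bstep]
  | succ n ih =>
    intro s hs d
    by_cases hn : '\n' ∈ s
    · obtain ⟨hdec, hfree⟩ := first_decomp '\n' s hn
      set a := s.takeWhile (fun x => x != '\n') with ha
      set b := (s.dropWhile (fun x => x != '\n')).tail with hb
      have hna : '\n' ∉ a := fun h => (hfree '\n' h) rfl
      have hlen : b.length ≤ n := by
        have hls : s.length = a.length + 1 + b.length := by
          conv_lhs => rw [hdec]
          simp
          omega
        omega
      conv_lhs => rw [hdec]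
      rw [show (a ++ '\n' :: b) ++ ['\n'] = (a ++ ['\n']) ++ (b ++ ['\n']) by simp,
          List.foldl_append, line_flush a hna d, ih b hlen (AstepC d a)]
      conv_rhs => rw [hdec]
      rw [linesOf_append a b hna, List.foldl_cons]
    · rw [linesOf_no_nl s hn, line_flush s hn d, List.foldl_cons, List.foldl_nil]

set_option maxHeartbeats 1000000 in
theorem main_eq (text : String) : parse_battery_fields_py text = parse_battery_fields_py_alt text := by
  have hb : ("bat:" : String).toList = ['b','a','t',':'] := by decide
  have hfind : PySem.Str.find text "bat:" = PySem.Chars.find text.toList ['b','a','t',':'] := by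
    simp [hb]
  by_cases h : PySem.Str.isIn "bat:" text = true
  · have hinf : ['b','a','t',':'] <:+: text.toList := by
      rw [← hb]
      exact (PySem.Str.isIn_iff_infix _ _).mp h
    have hfnn : 0 ≤ PySem.Chars.find text.toList ['b','a','t',':'] :=
      (PySem.Chars.find_nonneg_iff _ _).mpr hinf
    obtain ⟨hpre, hmin⟩ := PySem.Chars.find_spec hfnn
    set L := text.toList with hL
    set p := (PySem.Chars.find L ['b','a','t',':']).toNat with hpdef
    have hple : p ≤ L.length := by
      have := PySem.Chars.find_le_length L ['b','a','t',':']
      omega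
    obtain ⟨t, ht⟩ := hpre
    have hLdec : L = L.take p ++ (['b','a','t',':'] ++ t) := by
      conv_lhs => rw [← List.take_append_drop p L]
      rw [ht]
    have htake : (L.take p).length = p := by simp [hple]
    have hsom : PySem.Chars.splitOnMax L ['b','a','t',':'] 1 = [L.take p, t] := by
      conv_lhs => rw [hLdec]
      refine splitOnMax_sep ['b','a','t',':'] (by simp) (L.take p) t ?_
      intro i hi
      rw [← hLdec]
      exact hmin i (by omega)
    have hsec : ((PySem.Str.splitMax? text "bat:" 1).getD []).getD 1 "" = String.ofList t := by
      rw [PySem.Str.splitMax?, hb, ← hL, PySem.Chars.splitMax?, if_neg (by simp), hsom]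
      rfl
    have hposneg : ¬ (PySem.Str.find text "bat:" < 0) := by rw [hfind]; omega
    have hslice : (PySem.Str.slice text (some (PySem.Str.find text "bat:" + 4)) none).toList = t := by
      rw [PySem.Str.toList_slice, PySem.Chars.slice_eq_listSlice, ← hL,
          PySem.List.slice_from _ (by rw [hfind]; omega)]
      have h4 : (PySem.Str.find text "bat:" + 4).toNat = p + 4 := by
        rw [hfind]; omega
      rw [h4]
      conv_lhs => rw [hLdec]
      rw [show p + 4 = (L.take p).length + 4 by rw [htake],
          List.drop_length_add_append,
          show (4 : Nat) = (['b','a','t',':'] : List Char).length from rfl,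
          List.drop_left]
    have hlines : (PySem.Str.split? (String.ofList t) "\n").getD []
        = (linesOf t).map String.ofList := by
      rw [PySem.Str.split?, String.toList_ofList,
          show ("\n" : String).toList = ['\n'] by decide,
          PySem.Chars.split?, if_neg (by simp), splitOn_eq_linesOf]
      rfl
    simp only [parse_battery_fields_py, parse_battery_fields_py_alt]
    rw [if_pos h, if_neg hposneg, hsec, hslice, hlines, List.foldl_map]
    rw [show (fun (fields : PySem.Dict String String) (a : List Char) =>
          let line := PySem.Str.strip (String.ofList a)
          if PySem.Str.isIn "=" line then
            let parts := (PySem.Str.splitMax? line "=" 1).getD []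
            fields.insert (PySem.Str.strip (parts.getD 0 ""))
                          (PySem.Str.strip (parts.getD 1 ""))
          else fields)
        = AstepC from funext fun d => funext fun a => stepA_line d a]
    rw [mach_all t.length t le_rfl PySem.Dict.empty]
  · have hneg : PySem.Str.find text "bat:" < 0 := by
      have h1 := PySem.Chars.neg_one_le_find text.toList ['b','a','t',':']
      have h2 : ¬ 0 ≤ PySem.Chars.find text.toList ['b','a','t',':'] := by
        intro hc
        exact h ((PySem.Str.isIn_iff_infix _ _).mpr
          (by rw [hb]; exact (PySem.Chars.find_nonneg_iff _ _).mp hc))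
      rw [hfind]; omega
    simp only [parse_battery_fields_py, parse_battery_fields_py_alt]
    rw [if_neg h, if_pos hneg]

-- ===== VERDICT (by name: the statement is the Claim_ definition above) =====
theorem parse_battery_fields_py_spec : Claim_equal_parse_battery_fields_py := by
  intro text _
  unfold Spec_parse_battery_fields_py
  exact main_eq text
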